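-- pv_equiv track=rewrite | github.com/TheophileMelquiot/XGBoost_header_detection_package | excel_ai/upgrade_detection.py | merge_headers
-- ===== SOURCE A (Python) =====
-- def is_generic_parent(parent_values):
--     """
--     Returns True if all non-empty parent values are the same string,
--     indicating a single merged cell spanning multiple columns with no
--     meaningful sub-column names (e.g. "tous clients" repeated 4 times).
--     """
--     non_empty = [v for v in parent_values if v not in (None, "", "nan")]
--     if len(non_empty) <= 1:
--         return False
--     return len(set(non_empty)) == 1
--
-- def merge_headers(parent, child):
--     """
--     Merges parent and child header rows into a single list of column names.
--
--     For merged parent cells (same value repeated across consecutive columns),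
--     generates numbered variants like "tous clients 1", "tous clients 2", …
--     instead of concatenating the parent with actual data values.
--
--     For single-column parents, uses the standard "parent child" concatenation.
--     """
--     merged = []
--     n = len(parent)
--     i = 0
--
--     while i < n:
--         p_val = parent[i]
--         c_val = child[i] if i < len(child) else None
--
--         if p_val in (None, "", "nan"):
--             # No parent value – keep the child value as-is
--             if c_val not in (None, "", "nan"):
--                 merged.append(str(c_val).strip())
--             else:
--                 merged.append(None)
--             i += 1
--             continue
--
--         # Determine how many consecutive columns share this parent value
--         j = i + 1
--         while j < n and parent[j] == p_val:
--             j += 1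
--
--         if is_generic_parent(parent[i:j]):
--             # Generic merged cell: produce numbered variants, ignore child
--             label = str(p_val).strip()
--             for k in range(j - i):
--                 merged.append(f"{label} {k + 1}")
--         else:
--             # Single column: standard parent + child concatenation
--             parts = [str(p_val).strip()]
--             if c_val not in (None, "", "nan"):
--                 parts.append(str(c_val).strip())
--             merged.append(" ".join(parts))
--
--         i = j
--
--     return merged
-- ===== SOURCE B (Python) =====
-- def merge_headers(parent, child):
--     """Per-column re-implementation: each column's name is computed
--     independently from its own run boundaries (scan left / scan right),
--     instead of consuming runs sequentially with a moving index."""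
--     EMPTY = (None, "", "nan")
--     n = len(parent)
--
--     def name(i):
--         p = parent[i]
--         c = child[i] if i < len(child) else None
--         c = None if c in EMPTY else str(c).strip()
--         if p in EMPTY:
--             return c
--         left = i
--         while left > 0 and parent[left - 1] == p:
--             left -= 1
--         right = i
--         while right + 1 < n and parent[right + 1] == p:
--             right += 1
--         label = str(p).strip()
--         if left < right:
--             return f"{label} {i - left + 1}"
--         return label if c is None else f"{label} {c}"
--
--     return [name(i) for i in range(n)]
-- ===== Notes on version B (the rewrite author's own statement) =====
-- stated objective: alternative
-- what changed: B computes each column's name independently: for every index i it scans left and right from i to find its own run boundaries and derives the label from (i, left, right), replacing A's sequential run-consuming while loop with a per-column map over range(n).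
import Mathlib
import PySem

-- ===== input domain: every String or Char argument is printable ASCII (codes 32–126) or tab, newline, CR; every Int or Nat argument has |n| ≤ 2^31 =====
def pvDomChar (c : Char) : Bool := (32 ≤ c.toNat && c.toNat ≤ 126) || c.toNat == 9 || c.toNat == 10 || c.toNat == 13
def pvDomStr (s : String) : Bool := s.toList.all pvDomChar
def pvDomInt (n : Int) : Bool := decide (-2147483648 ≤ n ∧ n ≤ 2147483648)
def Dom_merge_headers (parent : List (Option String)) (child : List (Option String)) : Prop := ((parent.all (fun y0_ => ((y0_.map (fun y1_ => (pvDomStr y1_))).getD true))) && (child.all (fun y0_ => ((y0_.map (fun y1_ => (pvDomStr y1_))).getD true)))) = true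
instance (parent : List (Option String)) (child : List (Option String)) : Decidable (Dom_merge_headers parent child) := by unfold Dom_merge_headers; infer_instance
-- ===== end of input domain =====

-- B names each column independently by scanning left/right from that column for its
-- run boundaries (a map over range(n)), instead of A's sequential run-consuming loop;
-- alternative decomposition, same results, worst-case O(n*r) instead of O(n).


-- ===== PORT A =====
-- `v in (None, "", "nan")` (the tuple literal appears in both sources)
def pvEmpty (v : Option String) : Bool :=
  v == none || v == some "" || v == some "nan"

def is_generic_parent (parent_values : List (Option String)) : Bool :=
  let non_empty := parent_values.filter (fun v => !pvEmpty v)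
  if non_empty.length ≤ 1 then false
  else (PySem.Set.ofList non_empty).length == 1

-- inner `while j < n and parent[j] == p_val: j += 1` (fuel n - j keeps it structural)
def mergeA_run (parent : List (Option String)) (p_val : Option String) : Nat → Nat → Nat
  | 0, j => j
  | fuel + 1, j =>
    if j < parent.length then
      if parent.getD j none == p_val then mergeA_run parent p_val fuel (j + 1) else j
    else j

-- A's outer `while i < n` loop (fuel n - i; merged is produced front-to-back)
def mergeA_loop (parent child : List (Option String)) : Nat → Nat → List (Option String)
  | 0, _ => []
  | fuel + 1, i =>
    if i < parent.length then
      let p_val := parent.getD i none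
      let c_val := child.getD i none
      if pvEmpty p_val then
        (if !pvEmpty c_val then some (PySem.Str.strip (c_val.getD "")) else none)
          :: mergeA_loop parent child fuel (i + 1)
      else
        let j := mergeA_run parent p_val (parent.length - (i + 1)) (i + 1)
        if is_generic_parent (PySem.List.slice parent (some (i : Int)) (some (j : Int))) then
          ((List.range (j - i)).map
              (fun (k : Nat) => some (PySem.Str.strip (p_val.getD "") ++ " " ++ PySem.Int.toStr ((k : Int) + 1))))
            ++ mergeA_loop parent child fuel j
        else
          let parts :=
            if !pvEmpty c_val then
              [PySem.Str.strip (p_val.getD ""), PySem.Str.strip (c_val.getD "")]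
            else [PySem.Str.strip (p_val.getD "")]
          some (PySem.Str.join " " parts) :: mergeA_loop parent child fuel j
    else []

def merge_headers (parent : List (Option String)) (child : List (Option String)) : List (Option String) :=
  mergeA_loop parent child parent.length 0

-- ===== PORT B =====
-- `c = child[i] if i < len(child) else None; c = None if c in EMPTY else str(c).strip()`
def pvCellB (child : List (Option String)) (i : Nat) : Option String :=
  let c := child.getD i none
  if pvEmpty c then none else some (PySem.Str.strip (c.getD ""))

-- `while left > 0 and parent[left-1] == p: left -= 1` (structural descent on left)
def leftB (parent : List (Option String)) (p : Option String) : Nat → Nat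
  | 0 => 0
  | l + 1 => if parent.getD l none == p then leftB parent p l else l + 1

-- `while right + 1 < n and parent[right+1] == p: right += 1` (fuel n - right keeps it structural)
def rightBgo (parent : List (Option String)) (p : Option String) : Nat → Nat → Nat
  | 0, r => r
  | fuel + 1, r =>
    if r + 1 < parent.length then
      if parent.getD (r + 1) none == p then rightBgo parent p fuel (r + 1) else r
    else r

def rightB (parent : List (Option String)) (p : Option String) (r : Nat) : Nat :=
  rightBgo parent p (parent.length - r) r

-- `name(i)` of Source B
def colB (parent child : List (Option String)) (i : Nat) : Option String :=
  let p := parent.getD i none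
  let c := pvCellB child i
  if pvEmpty p then c
  else
    let left := leftB parent p i
    let right := rightB parent p i
    let label := PySem.Str.strip (p.getD "")
    if left < right then some (label ++ " " ++ PySem.Int.toStr ((i : Int) - (left : Int) + 1))
    else some (match c with
               | none => label
               | some cv => label ++ " " ++ cv)

def merge_headers_alt (parent : List (Option String)) (child : List (Option String)) : List (Option String) :=
  (List.range parent.length).map (colB parent child)

-- ===== PRECONDITION & SPEC =====
def Spec_merge_headers (parent : List (Option String)) (child : List (Option String)) (out : List (Option String)) : Prop := out = merge_headers_alt parent child
instance (parent : List (Option String)) (child : List (Option String)) (out : List (Option String)) : Decidable (Spec_merge_headers parent child out) := by unfold Spec_merge_headers; infer_instance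

-- ===== CLAIM (what is proved, stated in full; the proofs are below) =====
def Claim_equal_merge_headers : Prop := ∀ (parent : List (Option String)) (child : List (Option String)), Dom_merge_headers parent child → Spec_merge_headers parent child (merge_headers parent child)

-- ===== LEMMAS AND PROOFS =====


theorem mergeA_run_eq (parent : List (Option String)) (p : Option String) :
    ∀ fuel j, parent.length - j ≤ fuel →
      mergeA_run parent p fuel j = j + ((parent.drop j).takeWhile (· == p)).length := by
  intro fuel
  induction fuel with
  | zero =>
    intro j hj
    rw [mergeA_run, List.drop_eq_nil_iff.mpr (by omega)]
    simp
  | succ fuel ih =>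
    intro j hj
    by_cases h : j < parent.length
    case neg =>
      rw [mergeA_run, if_neg h, List.drop_eq_nil_iff.mpr (by omega)]
      simp
    case pos =>
    rw [mergeA_run, if_pos h, List.getD_eq_getElem _ _ h,
      List.drop_eq_getElem_cons h, List.takeWhile_cons]
    cases hbe : (parent[j] == p) with
    | true =>
      rw [ih (j + 1) (by omega)]
      simp
      omega
    | false =>
      simp

theorem take_takeWhile (l : List (Option String)) (q : Option String → Bool) :
    l.take (l.takeWhile q).length = l.takeWhile q :=
  (List.prefix_iff_eq_take.mp (List.takeWhile_prefix q)).symm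

theorem takeWhile_eq_replicate (l : List (Option String)) (p : Option String) :
    l.takeWhile (· == p) = List.replicate (l.takeWhile (· == p)).length p := by
  apply List.eq_replicate_of_mem
  intro b hb
  exact eq_of_beq (List.mem_takeWhile_imp (p := (· == p)) hb)

theorem set_replicate (p : Option String) (n : Nat) :
    PySem.Set.ofList (List.replicate (n + 1) p) = [p] := by
  have aux : ∀ m, List.foldl PySem.Set.add [p] (List.replicate m p) = [p] := by
    intro m
    induction m with
    | zero => rfl
    | succ k ih => simpa [List.replicate_succ, PySem.Set.add] using ih
  simpa [PySem.Set.ofList, List.replicate_succ, PySem.Set.add, PySem.Set.empty] using aux n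

theorem generic_run (p : Option String) (hp : pvEmpty p = false) (t : Nat) :
    is_generic_parent (List.replicate (t + 1) p) = decide (1 ≤ t) := by
  unfold is_generic_parent
  rw [List.filter_replicate]
  simp only [hp, Bool.not_false, if_true, List.length_replicate]
  cases t with
  | zero => simp
  | succ k =>
    rw [if_neg (by omega), set_replicate]
    simp

-- the slice A tests with is_generic_parent is exactly the run, a replicate
theorem slice_run (parent : List (Option String)) (i : Nat) (h : i < parent.length) (t : Nat)
    (ht : ((parent.drop (i + 1)).takeWhile (· == parent[i])).length = t) :
    PySem.List.slice parent (some (i : Int)) (some ((i + 1 + t : Nat) : Int))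
      = List.replicate (t + 1) parent[i] := by
  rw [PySem.List.slice_natCast, show i + 1 + t - i = t + 1 from by omega,
    List.drop_eq_getElem_cons h, List.take_succ_cons, List.replicate_succ]
  congr 1
  have h2 : (parent.drop (i + 1)).take t = (parent.drop (i + 1)).takeWhile (· == parent[i]) := by
    conv_lhs => rw [← ht]
    exact take_takeWhile _ _
  rw [h2, takeWhile_eq_replicate, ht]

theorem join_single (a : String) : PySem.Str.join " " [a] = a := by
  simp [PySem.Str.join, PySem.Chars.join, List.intercalate]

theorem join_pair (a b : String) : PySem.Str.join " " [a, b] = a ++ " " ++ b := by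
  rw [← String.toList_inj]
  simp [PySem.Str.join, PySem.Chars.join, List.intercalate, List.intersperse,
    String.toList_append]

-- a range' of m+n columns splits after the first m
theorem range'_split (s m n : Nat) :
    List.range' s (m + n) = List.range' s m ++ List.range' (s + m) n := by
  simp

-- the first element a takeWhile leaves out fails the predicate
theorem after_takeWhile (q : Option String → Bool) :
    ∀ l : List (Option String), (l.takeWhile q).length < l.length →
      q (l.getD (l.takeWhile q).length none) = false := by
  intro l
  induction l with
  | nil => intro h; simp at h
  | cons a l ih =>
    intro h
    cases hq : q a with
    | false =>
      simp [hq]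
    | true =>
      rw [List.takeWhile_cons] at h ⊢
      simp only [hq, if_true, List.length_cons, List.getD_cons_succ] at h ⊢
      exact ih (by omega)

theorem getD_drop (l : List (Option String)) (m i : Nat) :
    (l.drop m).getD i none = l.getD (m + i) none := by
  simp [List.getD_eq_getElem?_getD, List.getElem?_drop]

-- every position of the run carries the parent value
theorem run_val (parent : List (Option String)) (p : Option String) (i : Nat)
    (hi : i < parent.length) (hp : parent[i] = p) :
    ∀ t, i ≤ t → t < i + 1 + ((parent.drop (i + 1)).takeWhile (· == p)).length →
      parent.getD t none = p := by
  intro t h1 h2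
  rcases Nat.eq_or_lt_of_le h1 with he | hl
  · subst he
    rw [List.getD_eq_getElem _ _ hi]; exact hp
  · obtain ⟨rest, hrest⟩ := List.takeWhile_prefix (l := parent.drop (i + 1)) (· == p)
    have hk : t - (i + 1) < ((parent.drop (i + 1)).takeWhile (· == p)).length := by omega
    have e1 : parent.getD t none = (parent.drop (i + 1)).getD (t - (i + 1)) none := by
      rw [getD_drop, show i + 1 + (t - (i + 1)) = t from by omega]
    rw [e1, ← hrest, List.getD_append _ _ _ _ (by simpa using hk)]
    conv_lhs => rw [takeWhile_eq_replicate]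
    rw [List.getD_eq_getElem _ _ (by simpa using hk), List.getElem_replicate]

-- the value right after the run differs (when the run does not reach the end)
theorem run_end (parent : List (Option String)) (p : Option String) (i : Nat)
    (hi : i < parent.length)
    (hj : i + 1 + ((parent.drop (i + 1)).takeWhile (· == p)).length < parent.length) :
    parent.getD (i + 1 + ((parent.drop (i + 1)).takeWhile (· == p)).length) none ≠ p := by
  have hlt : ((parent.drop (i + 1)).takeWhile (· == p)).length < (parent.drop (i + 1)).length := by
    rw [List.length_drop]; omega
  have h1 := after_takeWhile (· == p) (parent.drop (i + 1)) hlt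
  rw [getD_drop] at h1
  simpa using h1

theorem leftB_eq (parent : List (Option String)) (p : Option String) (i j : Nat)
    (hstart : i = 0 ∨ parent.getD (i - 1) none ≠ p)
    (hrun : ∀ t, i ≤ t → t < j → parent.getD t none = p) :
    ∀ t, i ≤ t → t < j → leftB parent p t = i := by
  intro t
  induction t with
  | zero =>
    intro h1 h2
    simp only [leftB]
    omega
  | succ t ih =>
    intro h1 h2
    simp only [leftB]
    rcases Nat.eq_or_lt_of_le h1 with he | hl
    · rcases hstart with h0 | hne
      · omega
      · rw [if_neg]
        · omega
        · rw [show t = i - 1 from by omega]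
          intro hb
          exact hne (eq_of_beq hb)
    · rw [if_pos]
      · exact ih (by omega) (by omega)
      · exact beq_iff_eq.mpr (hrun t (by omega) (by omega))

theorem rightBgo_eq (parent : List (Option String)) (p : Option String) (i j : Nat)
    (hjle : j ≤ parent.length)
    (hend : j = parent.length ∨ parent.getD j none ≠ p)
    (hrun : ∀ t, i ≤ t → t < j → parent.getD t none = p) :
    ∀ fuel t, i ≤ t → t < j → parent.length - t ≤ fuel →
      rightBgo parent p fuel t = j - 1 := by
  intro fuel
  induction fuel with
  | zero =>
    intro t h1 h2 hf
    omega
  | succ fuel ih =>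
    intro t h1 h2 hf
    simp only [rightBgo]
    by_cases htj : t + 1 < j
    · rw [if_pos (by omega), if_pos (beq_iff_eq.mpr (hrun (t + 1) (by omega) htj))]
      exact ih (t + 1) (by omega) htj (by omega)
    · -- t = j - 1: the loop stops here
      split
      · rw [if_neg]
        · omega
        · have hne : parent.getD (t + 1) none ≠ p := by
            rw [show t + 1 = j from by omega]
            rcases hend with he | hne
            · exact absurd he (by omega)
            · exact hne
          intro hb
          exact hne (eq_of_beq hb)
      · omega

theorem rightB_eq (parent : List (Option String)) (p : Option String) (i j : Nat)
    (hjle : j ≤ parent.length)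
    (hend : j = parent.length ∨ parent.getD j none ≠ p)
    (hrun : ∀ t, i ≤ t → t < j → parent.getD t none = p) :
    ∀ t, i ≤ t → t < j → rightB parent p t = j - 1 := by
  intro t h1 h2
  exact rightBgo_eq parent p i j hjle hend hrun (parent.length - t) t h1 h2 le_rfl

theorem main_loop (parent child : List (Option String)) :
    ∀ fuel i, parent.length - i ≤ fuel →
    (i = 0 ∨ parent.length ≤ i ∨ pvEmpty (parent.getD i none) = true ∨
      parent.getD (i - 1) none ≠ parent.getD i none) →
    mergeA_loop parent child fuel i
      = (List.range' i (parent.length - i)).map (colB parent child) := by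
  intro fuel
  induction fuel with
  | zero =>
    intro i hm hinv
    rw [mergeA_loop, show parent.length - i = 0 from by omega]
    rfl
  | succ m ih =>
    intro i hm hinv
    by_cases h : i < parent.length
    case neg =>
      rw [mergeA_loop, if_neg h, show parent.length - i = 0 from by omega]
      rfl
    case pos =>
    have hgi : parent.getD i none = parent[i] := List.getD_eq_getElem _ _ h
    have hrange : parent.length - i = (parent.length - (i + 1)) + 1 := by omega
    have hcell : (if !pvEmpty (child.getD i none) then
          some (PySem.Str.strip ((child.getD i none).getD "")) else none) = pvCellB child i := by
      cases hc : pvEmpty (child.getD i none) <;>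
        simp only [pvCellB, hc, Bool.not_true, Bool.not_false, Bool.false_eq_true, reduceIte]
    by_cases hpe : pvEmpty parent[i] = true
    · -- empty parent cell: both sides treat the column alone
      rw [mergeA_loop, if_pos h]
      simp only [hgi, hpe, reduceIte, hcell]
      rw [hrange, List.range'_succ, List.map_cons]
      congr 1
      · unfold colB
        rw [hgi]
        simp only [hpe, reduceIte]
      · rw [ih (i + 1) (by omega)]
        by_cases h1 : i + 1 < parent.length
        · by_cases heq : parent.getD i none = parent.getD (i + 1) none
          · refine Or.inr (Or.inr (Or.inl ?_))
            rw [← heq, hgi]; exact hpe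
          · refine Or.inr (Or.inr (Or.inr ?_))
            simpa using heq
        · exact Or.inr (Or.inl (by omega))
    · -- non-empty parent cell: A consumes the run, B names each of its columns
      have hpe2 : pvEmpty parent[i] = false := by simpa using hpe
      have hstart : i = 0 ∨ parent.getD (i - 1) none ≠ parent[i] := by
        rcases hinv with h0 | h0 | h0 | h0
        · exact Or.inl h0
        · omega
        · rw [hgi, hpe2] at h0; simp at h0
        · rw [hgi] at h0; exact Or.inr h0
      set T := ((parent.drop (i + 1)).takeWhile (· == parent[i])).length with hTdef
      clear_value T
      have hT : T ≤ parent.length - (i + 1) := by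
        have := (List.takeWhile_prefix (l := parent.drop (i + 1)) (· == parent[i])).length_le
        rw [List.length_drop] at this
        rw [hTdef]
        exact this
      have hjrun : mergeA_run parent parent[i] (parent.length - (i + 1)) (i + 1) = i + 1 + T := by
        rw [hTdef]; exact mergeA_run_eq parent parent[i] (parent.length - (i + 1)) (i + 1) le_rfl
      have hrun : ∀ t, i ≤ t → t < i + 1 + T → parent.getD t none = parent[i] := by
        rw [hTdef]; exact run_val parent parent[i] i h rfl
      have hend : i + 1 + T = parent.length ∨ parent.getD (i + 1 + T) none ≠ parent[i] := by
        by_cases hjn : i + 1 + T < parent.length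
        · refine Or.inr ?_
          rw [hTdef] at hjn ⊢
          exact run_end parent parent[i] i h (by omega)
        · exact Or.inl (by omega)
      have hL := leftB_eq parent parent[i] i (i + 1 + T) hstart hrun
      have hR := rightB_eq parent parent[i] i (i + 1 + T) (by omega) hend hrun
      have hinv' : (i + 1 + T = 0 ∨ parent.length ≤ i + 1 + T ∨
          pvEmpty (parent.getD (i + 1 + T) none) = true ∨
          parent.getD (i + 1 + T - 1) none ≠ parent.getD (i + 1 + T) none) := by
        by_cases hjn : i + 1 + T < parent.length
        · refine Or.inr (Or.inr (Or.inr ?_))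
          rw [hrun (i + 1 + T - 1) (by omega) (by omega)]
          rcases hend with he | hne
          · exact absurd he (by omega)
          · exact fun e => hne e.symm
        · exact Or.inr (Or.inl (by omega))
      rw [mergeA_loop, if_pos h]
      simp only [hgi, hpe2, Bool.false_eq_true, if_false]
      rw [hjrun, slice_run parent i h T hTdef.symm, generic_run parent[i] hpe2 T]
      cases hTc : T with
      | zero =>
        -- run of length one: "parent child" concatenation
        subst hTc
        rw [if_neg (by decide)]
        rw [hrange, List.range'_succ, List.map_cons]
        congr 1
        · unfold colB
          rw [hgi]
          simp only [hpe2, Bool.false_eq_true, if_false]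
          rw [hL i le_rfl (by omega), hR i le_rfl (by omega)]
          have hcond : ¬ (i < i + 1 + 0 - 1) := by omega
          rw [if_neg hcond]
          cases hc : pvEmpty (child.getD i none) with
          | true =>
            have hcl : pvCellB child i = none := by
              simp only [pvCellB, hc, reduceIte]
            simp only [hcl, Bool.not_true, Bool.false_eq_true, if_false, join_single]
          | false =>
            have hcl : pvCellB child i = some (PySem.Str.strip ((child.getD i none).getD "")) := by
              simp only [pvCellB, hc, Bool.false_eq_true, reduceIte]
            simp only [hcl, Bool.not_false, if_true, join_pair]
        · simp only [Nat.add_zero] at hinv'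
          exact ih (i + 1) (by omega) hinv'
      | succ T' =>
        -- run of length ≥ 2: numbered variants
        subst hTc
        rw [if_pos (by simp)]
        have hsplit : List.range' i (parent.length - i)
            = List.range' i (T' + 2) ++ List.range' (i + (T' + 2)) (parent.length - (i + (T' + 2))) := by
          rw [show parent.length - i = (T' + 2) + (parent.length - (i + (T' + 2))) from by omega]
          exact range'_split i (T' + 2) (parent.length - (i + (T' + 2)))
        rw [hsplit, List.map_append]
        congr 1
        · -- the run's columns
          rw [List.range'_eq_map_range, List.map_map,
            show i + 1 + (T' + 1) - i = T' + 2 from by omega]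
          apply List.map_congr_left
          intro k hk
          rw [List.mem_range] at hk
          simp only [Function.comp_apply]
          have hik : i + k < i + 1 + (T' + 1) := by omega
          have hikl : i + k < parent.length := by omega
          unfold colB
          rw [hrun (i + k) (by omega) hik]
          simp only [hpe2, Bool.false_eq_true, if_false]
          rw [hL (i + k) (by omega) hik, hR (i + k) (by omega) hik]
          have hcond : i < i + 1 + (T' + 1) - 1 := by omega
          rw [if_pos hcond,
            show (((i + k : Nat) : Int) - (i : Int) + 1) = ((k : Int) + 1) from by
              push_cast; ring]
        · rw [show i + (T' + 2) = i + 1 + (T' + 1) from by omega]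
          exact ih (i + 1 + (T' + 1)) (by omega) hinv'

-- ===== VERDICT (by name: the statement is the Claim_ definition above) =====
theorem merge_headers_spec : Claim_equal_merge_headers := by
  intro parent child _
  unfold Spec_merge_headers merge_headers merge_headers_alt
  rw [main_loop parent child parent.length 0 (by omega) (Or.inl rfl), Nat.sub_zero,
    List.range'_eq_map_range]
  simp
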